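-- pv_equiv track=rewrite | github.com/powerlego/Year-1 | Homework/double_add_5.py | find_start_iter
-- ===== SOURCE A (Python) =====
-- def find_end_iter(start, count):
--     # Iteratively finds the value for the sequence and returns said value
--     n = count
--     while count <= n:
--         """if statements to end the loop as to not let it go on into infinity, also a defensive if statement is added
--         to make sure count >= 0"""
--         if count < 0:
--             break
--         elif count == 0:
--             break
--         else:
--             count = count - 1
--             start = (start * 2) + 5
--     return start
--
-- def find_start_iter(goal, count):
--     """ Uses iteration and the find_end_iter function to find the minimum starting value for the value after count
--     number of times so that its last value is greater than or equal to the goal"""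
--     n = 0
--     while True:
--         value = find_end_iter(n, count)
--         """if statements to end the loop as to not let it go on into infinity, also a defensive if statement is added
--         to make sure count >= 0"""
--         if value >= goal:
--             break
--         else:
--             n = n + 1
--     return n
-- ===== SOURCE B (Python) =====
-- def find_start_iter(goal, count):
--     if count < 0:
--         return max(0, goal)
--     p = 1 << count
--     return max(0, -(-(goal - 5 * (p - 1)) // p))
-- ===== Notes on version B (the rewrite author's own statement) =====
-- stated objective: faster
-- what changed: Replaced A's linear search (testing n = 0, 1, 2, ... and re-running the doubling loop for each candidate) with a closed-form ceiling division: n = max(0, ceil((goal - 5*(2^count - 1)) / 2^count)), with count < 0 behaving as 0 iterations like A.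
import Mathlib
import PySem

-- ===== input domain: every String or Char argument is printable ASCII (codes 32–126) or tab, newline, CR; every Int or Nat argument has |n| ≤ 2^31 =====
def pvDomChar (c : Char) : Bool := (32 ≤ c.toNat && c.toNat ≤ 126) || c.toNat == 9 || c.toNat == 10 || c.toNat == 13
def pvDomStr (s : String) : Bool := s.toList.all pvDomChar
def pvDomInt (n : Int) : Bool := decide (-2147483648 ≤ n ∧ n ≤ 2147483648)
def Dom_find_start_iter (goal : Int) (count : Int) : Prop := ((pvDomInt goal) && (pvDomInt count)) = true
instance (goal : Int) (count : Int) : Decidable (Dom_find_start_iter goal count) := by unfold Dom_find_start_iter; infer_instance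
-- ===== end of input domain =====

-- B replaces A's linear search (which re-runs the doubling loop for every candidate start)
-- by a closed-form ceiling division; measured faster (asymptotic).

-- ===== PORT A =====
-- find_end_iter's while loop: runs count times when count > 0, otherwise not at all
def find_end_iter_go : Nat → Int → Int
  | 0, s => s
  | k + 1, s => find_end_iter_go k (s * 2 + 5)

def find_end_iter (start : Int) (count : Int) : Int :=
  find_end_iter_go count.toNat start

-- needed by the termination proof of A's search loop: the end value is ≥ the start (start ≥ 0)
theorem find_end_iter_go_ge (k : Nat) (s : Int) (hs : 0 ≤ s) : s ≤ find_end_iter_go k s := by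
  induction k generalizing s with
  | zero => simp [find_end_iter_go]
  | succ k ih =>
      have h := ih (s * 2 + 5) (by omega)
      simp only [find_end_iter_go]
      omega

-- A's 'while True' search: n = 0; bump n until find_end_iter n count ≥ goal
def find_start_loop (goal : Int) (count : Int) (n : Nat) : Int :=
  if find_end_iter (n : Int) count ≥ goal then (n : Int)
  else find_start_loop goal count (n + 1)
  termination_by goal.toNat - n
  decreasing_by
    have h := find_end_iter_go_ge count.toNat (n : Int) (by positivity)
    simp only [find_end_iter, not_le] at *
    omega

def find_start_iter (goal : Int) (count : Int) : Int :=
  find_start_loop goal count 0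

-- ===== PORT B =====
def find_start_iter_alt (goal : Int) (count : Int) : Int :=
  if count < 0 then max 0 goal
  else
    let p : Int := 2 ^ count.toNat                     -- 1 << count  (count ≥ 0 here)
    max 0 (-(PySem.Int.floordiv (-(goal - 5 * (p - 1))) p))   -- max(0, ceil((goal-5(p-1))/p))

-- ===== PRECONDITION & SPEC =====
def Spec_find_start_iter (goal : Int) (count : Int) (out : Int) : Prop := out = find_start_iter_alt goal count
instance (goal : Int) (count : Int) (out : Int) : Decidable (Spec_find_start_iter goal count out) := by unfold Spec_find_start_iter; infer_instance

-- ===== CLAIM (what is proved, stated in full; the proofs are below) =====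
def Claim_equal_find_start_iter : Prop := ∀ (goal : Int) (count : Int), Dom_find_start_iter goal count → Spec_find_start_iter goal count (find_start_iter goal count)

-- ===== LEMMAS AND PROOFS =====

-- closed form of A's inner loop
theorem find_end_iter_go_closed (k : Nat) (s : Int) :
    find_end_iter_go k s = 2 ^ k * s + 5 * (2 ^ k - 1) := by
  induction k generalizing s with
  | zero => simp [find_end_iter_go]
  | succ k ih =>
      simp only [find_end_iter_go, ih, pow_succ]
      ring

-- B's value T as the least nonnegative n with 2^k * n + 5*(2^k - 1) ≥ goal:
theorem alt_spec (goal : Int) (k : Nat) (m : Int) (hm : 0 ≤ m) :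
    let p : Int := 2 ^ k
    (max 0 (-(PySem.Int.floordiv (-(goal - 5 * (p - 1))) p)) ≤ m ↔ goal ≤ p * m + 5 * (p - 1)) := by
  intro p
  have hp : (0 : Int) < p := by positivity
  constructor
  · intro h
    have h2 : -m ≤ PySem.Int.floordiv (-(goal - 5 * (p - 1))) p := by omega
    rw [PySem.Int.le_floordiv_iff_mul_le hp] at h2
    nlinarith
  · intro h
    have h2 : -m ≤ PySem.Int.floordiv (-(goal - 5 * (p - 1))) p := by
      rw [PySem.Int.le_floordiv_iff_mul_le hp]
      nlinarith
    omega

-- the alt value, branch-free: for every count, it equals the k := count.toNat formula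
theorem alt_eq (goal : Int) (count : Int) :
    find_start_iter_alt goal count =
      max 0 (-(PySem.Int.floordiv (-(goal - 5 * ((2:Int) ^ count.toNat - 1))) ((2:Int) ^ count.toNat))) := by
  unfold find_start_iter_alt
  split
  · rename_i h
    have : count.toNat = 0 := by omega
    rw [this]
    have : PySem.Int.floordiv (-(goal - 5 * ((2:Int) ^ 0 - 1))) ((2:Int) ^ 0) = -goal := by
      simp [PySem.Int.floordiv, Int.fdiv_one]
    simp only [this]
    omega
  · rfl

theorem loop_eq (goal : Int) (count : Int) (n : Nat)
    (hle : (n : Int) ≤ find_start_iter_alt goal count) :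
    find_start_loop goal count n = find_start_iter_alt goal count := by
  have halt := alt_eq goal count
  set k := count.toNat with hk
  set T := find_start_iter_alt goal count with hT
  have hT0 : 0 ≤ T := by rw [halt]; omega
  -- characterisation: for 0 ≤ m, T ≤ m ↔ find_end_iter m count ≥ goal
  have hchar : ∀ m : Int, 0 ≤ m → (T ≤ m ↔ goal ≤ find_end_iter m count) := by
    intro m hm
    rw [find_end_iter, find_end_iter_go_closed, halt]
    exact alt_spec goal k m hm
  clear halt
  -- induction on the remaining distance
  generalize hd : (T - (n : Int)).toNat = d
  induction d generalizing n with
  | zero =>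
      have hn : (n : Int) = T := by omega
      rw [find_start_loop]
      have hyes : find_end_iter (n : Int) count ≥ goal := (hchar _ (by positivity)).mp (by omega)
      rw [if_pos hyes, hn]
  | succ d ih =>
      rw [find_start_loop]
      by_cases h : find_end_iter (n : Int) count ≥ goal
      · -- then T ≤ n already, so n = T — contradiction with distance d+1 unless... actually n = T impossible here
        have : T ≤ (n : Int) := by
          by_contra hlt
          push Not at hlt
          -- n < T means goal > find_end_iter n
          have := (hchar (n : Int) (by positivity)).mpr h
          omega
        omega
      · simp only [h, if_false]
        have hnT : (n : Int) < T := by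
          by_contra hge
          push Not at hge
          exact h ((hchar (n : Int) (by positivity)).mp hge)
        exact ih (n + 1) (by push_cast; omega) (by push_cast; omega)

-- ===== VERDICT (by name: the statement is the Claim_ definition above) =====
theorem find_start_iter_spec : Claim_equal_find_start_iter := by
  intro goal count _
  unfold Spec_find_start_iter find_start_iter
  apply loop_eq
  rw [alt_eq]
  simp
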